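-- pv_equiv track=rewrite | github.com/nlpet/misc | worldmap.py | find_num_countries
-- ===== SOURCE A (Python) =====
-- def find_adjacent(map, visited, i, j, l, w):
--     """Find adjacent cells of the same value."""
--     neighbours = ((i - 1, j), (i, j + 1),
--                   (i + 1, j), (i, j - 1))
--
--     neighbour_indices = set()
--     visited[i][j] = True
--
--     for y, x in neighbours:
--         if 0 <= y < l and 0 <= x < w and map[y][x] == map[i][j]:
--             neighbour_indices.add((y, x))
--     return neighbour_indices
--
-- def find_num_countries(map):
--     """Count the number of distinct countries."""
--     # If map is empty, return 0
--     assert len(map) > 0, "Error - empty list"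
--     assert type(map[0]) == list, "Error - expected 2D array of ints"
--
--     l, w = len(map), len(map[0])
--     visited = [[False] * w for _ in range(l)]
--     countries = {}
--
--     for i in range(l):
--         for j in range(w):
--             if not visited[i][j]:
--                 if map[i][j] in countries.keys():
--                     countries[map[i][j]].update(
--                         find_adjacent(map, visited, i, j, l, w))
--                 else:
--                     countries[map[i][j]] = {(i, j)}
--                     countries[map[i][j]].update(
--                         find_adjacent(map, visited, i, j, l, w))
--     return sum([1 for v in countries.values() if len(v) > 1])
-- ===== SOURCE B (Python) =====
-- def find_num_countries(map):
--     """Count the number of distinct countries."""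
--     assert len(map) > 0, "Error - empty list"
--     assert type(map[0]) == list, "Error - expected 2D array of ints"
--
--     l, w = len(map), len(map[0])
--     adjacent_values = set()
--     for i in range(l):
--         for j in range(w):
--             v = map[i][j]
--             if (j + 1 < w and map[i][j + 1] == v) or \
--                (i + 1 < l and map[i + 1][j] == v):
--                 adjacent_values.add(v)
--     return len(adjacent_values)
-- ===== Notes on version B (the rewrite author's own statement) =====
-- stated objective: simpler
-- what changed: Replaces the visited grid, the per-value coordinate-set dictionary and the find_adjacent helper (four-neighbour scan) with one flat pass that only compares each cell to its right and down neighbours and collects, in a single set, the values having an equal adjacent pair.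
import Mathlib
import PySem

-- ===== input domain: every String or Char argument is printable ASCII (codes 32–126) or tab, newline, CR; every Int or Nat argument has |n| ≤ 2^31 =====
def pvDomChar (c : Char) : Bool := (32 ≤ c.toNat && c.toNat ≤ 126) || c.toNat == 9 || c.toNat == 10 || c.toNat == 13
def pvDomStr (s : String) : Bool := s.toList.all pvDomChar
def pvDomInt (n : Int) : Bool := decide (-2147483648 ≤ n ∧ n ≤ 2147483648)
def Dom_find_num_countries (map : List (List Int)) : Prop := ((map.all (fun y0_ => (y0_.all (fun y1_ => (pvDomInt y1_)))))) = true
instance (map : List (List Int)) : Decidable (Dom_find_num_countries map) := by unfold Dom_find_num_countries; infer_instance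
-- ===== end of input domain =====

-- B replaces A's visited grid, per-value coordinate-set dict and 4-neighbour helper with one
-- flat pass collecting, in a single set, the values having an equal right or down neighbour (objective: simpler).

-- map[i][j] for in-range indices (Pre_ keeps all accessed indices in range)
def pvCell (map : List (List Int)) (i j : Nat) : Int := (map.getD i []).getD j 0

-- ===== PORT A =====
def find_adjacent (map : List (List Int)) (visited : List (List Bool)) (i j l w : Nat) :
    PySem.Set (Int × Int) × List (List Bool) :=
  let neighbours : List (Int × Int) :=
    [((i : Int) - 1, (j : Int)), ((i : Int), (j : Int) + 1),
     ((i : Int) + 1, (j : Int)), ((i : Int), (j : Int) - 1)]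
  let visited := visited.set i ((visited.getD i []).set j true)
  let nis := neighbours.foldl (fun s p =>
    if 0 ≤ p.1 ∧ p.1 < (l : Int) ∧ 0 ≤ p.2 ∧ p.2 < (w : Int) ∧
        pvCell map p.1.toNat p.2.toNat = pvCell map i j
    then PySem.Set.add s p else s) PySem.Set.empty
  (nis, visited)

def find_num_countries (map : List (List Int)) : Int :=
  let l := map.length
  let w := map.headI.length
  let st := (List.range l).foldl (fun st i =>
    (List.range w).foldl (fun (st : List (List Bool) × PySem.Dict Int (PySem.Set (Int × Int))) j =>
      if (st.1.getD i []).getD j false = false then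
        let v := pvCell map i j
        let countries := if st.2.contains v then st.2
                         else st.2.insert v (PySem.Set.ofList [((i : Int), (j : Int))])
        let r := find_adjacent map st.1 i j l w
        (r.2, countries.modify v PySem.Set.empty (fun s => PySem.Set.update s r.1))
      else st) st)
    (List.replicate l (List.replicate w false), PySem.Dict.empty)
  ((st.2.values.filter (fun s => decide (1 < s.length))).map (fun _ => (1 : Int))).sum

-- ===== PORT B =====
def find_num_countries_alt (map : List (List Int)) : Int :=
  let l := map.length
  let w := map.headI.length
  let s := (List.range l).foldl (fun s i =>
    (List.range w).foldl (fun (s : PySem.Set Int) j =>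
      let v := pvCell map i j
      if (decide (j + 1 < w) && (pvCell map i (j + 1) == v)) ||
         (decide (i + 1 < l) && (pvCell map (i + 1) j == v))
      then PySem.Set.add s v else s) s) PySem.Set.empty
  (s.length : Int)

-- ===== PRECONDITION & SPEC =====
-- Pre_ excludes map = [] (A's `assert len(map) > 0` raises AssertionError) and jagged maps in which
-- some row is shorter than row 0 (A raises IndexError on map[y][x] there); on all other inputs A returns.
def Pre_find_num_countries (map : List (List Int)) : Prop :=
  map ≠ [] ∧ ∀ row ∈ map, map.headI.length ≤ row.length
instance (map : List (List Int)) : Decidable (Pre_find_num_countries map) := by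
  unfold Pre_find_num_countries; infer_instance

def pvWitness_find_num_countries : List (List Int) := [[1, 1], [2, 3]]

def Spec_find_num_countries (map : List (List Int)) (out : Int) : Prop := out = find_num_countries_alt map
instance (map : List (List Int)) (out : Int) : Decidable (Spec_find_num_countries map out) := by unfold Spec_find_num_countries; infer_instance

-- ===== CLAIM (what is proved, stated in full; the proofs are below) =====
def Claim_equal_find_num_countries : Prop := ∀ (map : List (List Int)), Dom_find_num_countries map → Pre_find_num_countries map → Spec_find_num_countries map (find_num_countries map)

-- ===== LEMMAS AND PROOFS =====

-- the grid of cell indices in row-major order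
def pvGrid (l w : Nat) : List (Nat × Nat) :=
  (List.range l).flatMap (fun i => (List.range w).map (fun j => (i, j)))

lemma mem_pvGrid {l w : Nat} {p : Nat × Nat} : p ∈ pvGrid l w ↔ p.1 < l ∧ p.2 < w := by
  cases p; simp [pvGrid, List.mem_flatMap]

lemma nodup_pvGrid (l w : Nat) : (pvGrid l w).Nodup := by
  apply List.nodup_flatMap.mpr
  constructor
  · intro i _
    exact List.Nodup.map (fun a b h => by simpa using congrArg Prod.snd h) (List.nodup_range)
  · refine List.Pairwise.imp ?_ (List.pairwise_lt_range (n := l))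
    intro a b hab x hxa hxb
    simp only [List.mem_map] at hxa hxb
    obtain ⟨ja, _, rfl⟩ := hxa
    obtain ⟨jb, _, h⟩ := hxb
    have := congrArg Prod.fst h
    simp at this
    omega

lemma foldl_pvGrid {α : Type} (l w : Nat) (f : α → Nat × Nat → α) (init : α) :
    (pvGrid l w).foldl f init
      = (List.range l).foldl (fun s i => (List.range w).foldl (fun s j => f s (i, j)) s) init := by
  rw [pvGrid, List.foldl_flatMap]
  simp only [List.foldl_map]

-- adjacency of two cells (orthogonal neighbours)
def pvAdj (p q : Nat × Nat) : Prop :=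
  (p.1 = q.1 ∧ (p.2 + 1 = q.2 ∨ q.2 + 1 = p.2)) ∨ (p.2 = q.2 ∧ (p.1 + 1 = q.1 ∨ q.1 + 1 = p.1))

lemma pvAdj_symm {p q : Nat × Nat} (h : pvAdj p q) : pvAdj q p := by
  unfold pvAdj at *; omega

lemma pvAdj_ne {p q : Nat × Nat} (h : pvAdj p q) : p ≠ q := by
  unfold pvAdj at h; intro he; rw [he] at h; omega

-- a cell has SOME equal-valued in-bounds neighbour
def pvCond4 (map : List (List Int)) (l w : Nat) (p : Nat × Nat) : Prop :=
  ∃ q : Nat × Nat, q.1 < l ∧ q.2 < w ∧ pvAdj p q ∧ pvCell map q.1 q.2 = pvCell map p.1 p.2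

-- a cell has an equal-valued right or down neighbour (B's test)
def pvCondB (map : List (List Int)) (l w : Nat) (p : Nat × Nat) : Bool :=
  (decide (p.2 + 1 < w) && (pvCell map p.1 (p.2 + 1) == pvCell map p.1 p.2)) ||
  (decide (p.1 + 1 < l) && (pvCell map (p.1 + 1) p.2 == pvCell map p.1 p.2))

lemma cond4_iff_condB (map : List (List Int)) (l w : Nat) (v : Int) :
    (∃ p ∈ pvGrid l w, pvCell map p.1 p.2 = v ∧ pvCond4 map l w p)
      ↔ ∃ p ∈ pvGrid l w, pvCell map p.1 p.2 = v ∧ pvCondB map l w p = true := by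
  constructor
  · rintro ⟨p, hp, hv, q, hq1, hq2, hadj, hval⟩
    rw [mem_pvGrid] at hp
    rcases hadj with ⟨h1, h2 | h2⟩ | ⟨h1, h2 | h2⟩
    · exact ⟨p, mem_pvGrid.mpr hp, hv, by
        simp only [pvCondB, Bool.or_eq_true, Bool.and_eq_true, decide_eq_true_iff, beq_iff_eq]
        left; refine ⟨by omega, ?_⟩
        have : q = (p.1, p.2 + 1) := by cases q; cases p; simp_all
        rw [this] at hval; exact hval⟩
    · refine ⟨q, mem_pvGrid.mpr ⟨hq1, hq2⟩, by rw [hval, hv], ?_⟩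
      simp only [pvCondB, Bool.or_eq_true, Bool.and_eq_true, decide_eq_true_iff, beq_iff_eq]
      left; refine ⟨by omega, ?_⟩
      have : p = (q.1, q.2 + 1) := by cases q; cases p; simp_all
      rw [this] at hval; exact hval.symm
    · exact ⟨p, mem_pvGrid.mpr hp, hv, by
        simp only [pvCondB, Bool.or_eq_true, Bool.and_eq_true, decide_eq_true_iff, beq_iff_eq]
        right; refine ⟨by omega, ?_⟩
        have : q = (p.1 + 1, p.2) := by cases q; cases p; simp_all
        rw [this] at hval; exact hval⟩
    · refine ⟨q, mem_pvGrid.mpr ⟨hq1, hq2⟩, by rw [hval, hv], ?_⟩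
      simp only [pvCondB, Bool.or_eq_true, Bool.and_eq_true, decide_eq_true_iff, beq_iff_eq]
      right; refine ⟨by omega, ?_⟩
      have : p = (q.1 + 1, q.2) := by cases q; cases p; simp_all
      rw [this] at hval; exact hval.symm
  · rintro ⟨p, hp, hv, hb⟩
    rw [mem_pvGrid] at hp
    simp only [pvCondB, Bool.or_eq_true, Bool.and_eq_true, decide_eq_true_iff, beq_iff_eq] at hb
    rcases hb with ⟨hlt, heq⟩ | ⟨hlt, heq⟩
    · exact ⟨p, mem_pvGrid.mpr hp, hv, (p.1, p.2 + 1), by omega, hlt, Or.inl ⟨rfl, Or.inl rfl⟩, heq⟩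
    · exact ⟨p, mem_pvGrid.mpr hp, hv, (p.1 + 1, p.2), hlt, by omega, Or.inr ⟨rfl, Or.inl rfl⟩, heq⟩


-- ---- B-side evaluation ----

def pvM (map : List (List Int)) (l w : Nat) : List Int :=
  ((pvGrid l w).filter (pvCondB map l w)).map (fun p => pvCell map p.1 p.2)

lemma alt_eq (map : List (List Int)) :
    find_num_countries_alt map
      = ((PySem.Set.ofList (pvM map map.length map.headI.length)).length : Int) := by
  have h1 : (pvGrid map.length map.headI.length).foldl
      (fun (s : PySem.Set Int) (p : Nat × Nat) =>
        if pvCondB map map.length map.headI.length p then PySem.Set.add s (pvCell map p.1 p.2) else s)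
      PySem.Set.empty
      = (List.range map.length).foldl (fun s i =>
          (List.range map.headI.length).foldl
            (fun (s : PySem.Set Int) j =>
              let v := pvCell map i j
              if (decide (j + 1 < map.headI.length) && (pvCell map i (j + 1) == v)) ||
                 (decide (i + 1 < map.length) && (pvCell map (i + 1) j == v))
              then PySem.Set.add s v else s) s) PySem.Set.empty :=
    by
      refine (foldl_pvGrid map.length map.headI.length _ _).trans ?_
      refine PySem.List.foldl_congr_mem _ _ _ _ ?_
      intro acc i hi
      exact PySem.List.foldl_congr_mem _ _ _ _ (fun a j _ => rfl)
  have h2 : find_num_countries_alt map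
      = (((pvGrid map.length map.headI.length).foldl
          (fun (s : PySem.Set Int) (p : Nat × Nat) =>
            if pvCondB map map.length map.headI.length p then PySem.Set.add s (pvCell map p.1 p.2) else s)
          PySem.Set.empty).length : Int) := by
    simp only [find_num_countries_alt]
    rw [h1]
  rw [h2, PySem.List.foldl_if_eq_foldl_filter,
    ← List.foldl_map (f := fun (p : Nat × Nat) => pvCell map p.1 p.2) (g := PySem.Set.add),
    show (PySem.Set.empty : PySem.Set Int) = [] from rfl, ← PySem.Set.ofList_eq_foldl]
  rfl

lemma mem_pvM {map : List (List Int)} {l w : Nat} {v : Int} :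
    v ∈ pvM map l w ↔ ∃ p ∈ pvGrid l w, pvCell map p.1 p.2 = v ∧ pvCondB map l w p = true := by
  simp only [pvM, List.mem_map, List.mem_filter]
  constructor
  · rintro ⟨p, ⟨hp, hb⟩, rfl⟩; exact ⟨p, hp, rfl, hb⟩
  · rintro ⟨p, hp, rfl, hb⟩; exact ⟨p, ⟨hp, hb⟩, rfl⟩

-- ---- A-side machinery ----

def pvMark (vis : List (List Bool)) (p : Nat × Nat) : List (List Bool) :=
  vis.set p.1 ((vis.getD p.1 []).set p.2 true)

def pvVis0 (l w : Nat) : List (List Bool) := List.replicate l (List.replicate w false)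

def pvVisOf (l w : Nat) (pre : List (Nat × Nat)) : List (List Bool) :=
  pre.foldl pvMark (pvVis0 l w)

def pvVisAt (vis : List (List Bool)) (p : Nat × Nat) : Bool := (vis.getD p.1 []).getD p.2 false

def pvNbrs (map : List (List Int)) (l w : Nat) (p : Nat × Nat) : PySem.Set (Int × Int) :=
  ([((p.1 : Int) - 1, (p.2 : Int)), ((p.1 : Int), (p.2 : Int) + 1),
    ((p.1 : Int) + 1, (p.2 : Int)), ((p.1 : Int), (p.2 : Int) - 1)]).foldl
    (fun s q =>
      if 0 ≤ q.1 ∧ q.1 < (l : Int) ∧ 0 ≤ q.2 ∧ q.2 < (w : Int) ∧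
          pvCell map q.1.toNat q.2.toNat = pvCell map p.1 p.2
      then PySem.Set.add s q else s) PySem.Set.empty

def pvDStep (map : List (List Int)) (l w : Nat)
    (d : PySem.Dict Int (PySem.Set (Int × Int))) (p : Nat × Nat) :
    PySem.Dict Int (PySem.Set (Int × Int)) :=
  (if d.contains (pvCell map p.1 p.2) then d
   else d.insert (pvCell map p.1 p.2) (PySem.Set.ofList [((p.1 : Int), (p.2 : Int))])).modify
    (pvCell map p.1 p.2) PySem.Set.empty (fun s => PySem.Set.update s (pvNbrs map l w p))

def pvFoldD (map : List (List Int)) (l w : Nat) (cs : List (Nat × Nat)) :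
    PySem.Dict Int (PySem.Set (Int × Int)) :=
  cs.foldl (pvDStep map l w) PySem.Dict.empty

def pvStepA (map : List (List Int)) (l w : Nat)
    (st : List (List Bool) × PySem.Dict Int (PySem.Set (Int × Int))) (p : Nat × Nat) :
    List (List Bool) × PySem.Dict Int (PySem.Set (Int × Int)) :=
  if pvVisAt st.1 p = false then (pvMark st.1 p, pvDStep map l w st.2 p) else st

def pvShape (vis : List (List Bool)) (l w : Nat) : Prop :=
  vis.length = l ∧ ∀ r ∈ vis, r.length = w

lemma shape_mark {vis : List (List Bool)} {l w : Nat} {p : Nat × Nat}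
    (h : pvShape vis l w) (hp : p.1 < l ∧ p.2 < w) : pvShape (pvMark vis p) l w := by
  obtain ⟨hl, hw⟩ := h
  refine ⟨by simp [pvMark, hl], ?_⟩
  intro r hr
  rcases List.mem_or_eq_of_mem_set hr with hmem | rfl
  · exact hw r hmem
  · have h1 : p.1 < vis.length := by omega
    have : vis.getD p.1 [] = vis[p.1] := by
      simp [List.getD_eq_getElem?_getD, List.getElem?_eq_getElem h1]
    rw [List.length_set, this]
    exact hw _ (List.getElem_mem h1)

lemma visAt_mark {vis : List (List Bool)} {l w : Nat} {q : Nat × Nat}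
    (h : pvShape vis l w) (hq : q.1 < l ∧ q.2 < w) (p : Nat × Nat) :
    pvVisAt (pvMark vis q) p = (decide (p = q) || pvVisAt vis p) := by
  obtain ⟨hl, hw⟩ := h
  have h1 : q.1 < vis.length := by omega
  have hrow : vis.getD q.1 [] = vis[q.1] := by
    simp [List.getD_eq_getElem?_getD, List.getElem?_eq_getElem h1]
  by_cases hp1 : p.1 = q.1
  · have : pvVisAt (pvMark vis q) p = ((vis.getD q.1 []).set q.2 true).getD p.2 false := by
      simp [pvVisAt, pvMark, hp1, List.getD_eq_getElem?_getD, List.getElem?_set_self h1]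
    rw [this]
    by_cases hp2 : p.2 = q.2
    · have h2 : q.2 < (vis.getD q.1 []).length := by
        rw [hrow]; rw [hw _ (List.getElem_mem h1)]; omega
      have hpq : p = q := by cases p; cases q; simp_all
      rw [hpq, List.getD_eq_getElem?_getD, List.getElem?_set_self h2]
      simp
    · have hpq : p ≠ q := by intro h; exact hp2 (by rw [h])
      simp [pvVisAt, hp1, hpq, List.getD_eq_getElem?_getD,
        List.getElem?_set_ne (fun h => hp2 h.symm)]
  · have hpq : p ≠ q := by intro h; exact hp1 (by rw [h])
    simp [pvVisAt, pvMark, hpq, List.getD_eq_getElem?_getD,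
      List.getElem?_set_ne (fun h => hp1 h.symm)]

lemma shape_vis0 (l w : Nat) : pvShape (pvVis0 l w) l w := by
  refine ⟨by simp [pvVis0], fun r hr => ?_⟩
  rw [List.eq_of_mem_replicate hr]; simp

lemma visAt_vis0 (l w : Nat) (p : Nat × Nat) : pvVisAt (pvVis0 l w) p = false := by
  unfold pvVisAt pvVis0
  by_cases h : p.1 < l
  · simp [List.getD_eq_getElem?_getD, List.getElem?_replicate, h]
    by_cases h2 : p.2 < w <;> simp [List.getElem?_replicate, h2]
  · simp [List.getD_eq_getElem?_getD, List.getElem?_replicate, h]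

lemma visAt_foldl_mark {l w : Nat} (p : Nat × Nat) :
    ∀ (pre : List (Nat × Nat)) (vis : List (List Bool)), pvShape vis l w →
      (∀ q ∈ pre, q.1 < l ∧ q.2 < w) →
      pvVisAt (pre.foldl pvMark vis) p = (decide (p ∈ pre) || pvVisAt vis p) := by
  intro pre
  induction pre with
  | nil => intro vis _ _; simp
  | cons q pre ih =>
    intro vis h hb
    have hq := hb q (by simp)
    rw [List.foldl_cons, ih _ (shape_mark h hq) (fun r hr => hb r (by simp [hr])),
      visAt_mark h hq]
    by_cases h1 : p = q <;> by_cases h2 : p ∈ pre <;> simp [h1, h2]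

lemma visAt_visOf {l w : Nat} (pre : List (Nat × Nat)) (p : Nat × Nat)
    (hb : ∀ q ∈ pre, q.1 < l ∧ q.2 < w) :
    pvVisAt (pvVisOf l w pre) p = decide (p ∈ pre) := by
  rw [pvVisOf, visAt_foldl_mark p pre _ (shape_vis0 l w) hb, visAt_vis0]
  simp

lemma loopA {map : List (List Int)} {l w : Nat} :
    ∀ (cs pre : List (Nat × Nat)), pre ++ cs = pvGrid l w →
      (cs.foldl (pvStepA map l w) (pvVisOf l w pre, pvFoldD map l w pre)).2
        = pvFoldD map l w (pvGrid l w) := by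
  intro cs
  induction cs with
  | nil =>
    intro pre h
    simp only [List.append_nil] at h
    simp [h]
  | cons p cs ih =>
    intro pre h
    have hball : ∀ q ∈ pre ++ p :: cs, q.1 < l ∧ q.2 < w := by
      intro q hqmem; rw [h] at hqmem; exact mem_pvGrid.mp hqmem
    have hnotin : p ∉ pre := by
      have hnd : (pre ++ p :: cs).Nodup := h ▸ nodup_pvGrid l w
      have hd := (List.nodup_append.mp hnd).2.2
      intro hmem
      exact hd p hmem p (by simp) rfl
    have hstep : pvStepA map l w (pvVisOf l w pre, pvFoldD map l w pre) p
        = (pvVisOf l w (pre ++ [p]), pvFoldD map l w (pre ++ [p])) := by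
      unfold pvStepA
      rw [visAt_visOf pre p (fun q hq => hball q (by simp [hq]))]
      simp only [hnotin, decide_false]
      rw [if_pos trivial]
      refine Prod.ext ?_ ?_ <;> simp [pvVisOf, pvFoldD, List.foldl_append]
    rw [List.foldl_cons, hstep]
    exact ih (pre ++ [p]) (by simpa using h)

lemma a_eq (map : List (List Int)) :
    find_num_countries map
      = (((pvFoldD map map.length map.headI.length
            (pvGrid map.length map.headI.length)).values.filter
              (fun s => decide (1 < s.length))).map (fun _ => (1 : Int))).sum := by
  have h1 : (pvGrid map.length map.headI.length).foldl
      (pvStepA map map.length map.headI.length)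
      (List.replicate map.length (List.replicate map.headI.length false), PySem.Dict.empty)
      = (List.range map.length).foldl (fun st i =>
          (List.range map.headI.length).foldl
            (fun (st : List (List Bool) × PySem.Dict Int (PySem.Set (Int × Int))) j =>
              if (st.1.getD i []).getD j false = false then
                let v := pvCell map i j
                let countries := if st.2.contains v then st.2
                                 else st.2.insert v (PySem.Set.ofList [((i : Int), (j : Int))])
                let r := find_adjacent map st.1 i j map.length map.headI.length
                (r.2, countries.modify v PySem.Set.empty (fun s => PySem.Set.update s r.1))
              else st) st)
          (List.replicate map.length (List.replicate map.headI.length false), PySem.Dict.empty) :=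
    by
      refine (foldl_pvGrid map.length map.headI.length _ _).trans ?_
      refine PySem.List.foldl_congr_mem _ _ _ _ ?_
      intro acc i hi
      exact PySem.List.foldl_congr_mem _ _ _ _ (fun a j _ => rfl)
  have h2 : (pvGrid map.length map.headI.length).foldl
      (pvStepA map map.length map.headI.length)
      (List.replicate map.length (List.replicate map.headI.length false), PySem.Dict.empty)
      = (pvGrid map.length map.headI.length).foldl
          (pvStepA map map.length map.headI.length)
          (pvVisOf map.length map.headI.length [], pvFoldD map map.length map.headI.length []) := rfl
  have h3 := loopA (map := map) (l := map.length) (w := map.headI.length)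
      (pvGrid map.length map.headI.length) [] rfl
  rw [← h2, h1] at h3
  simp only [find_num_countries]
  rw [h3]


-- ---- characterization of A's countries dict ----

lemma foldD_append (map : List (List Int)) (l w : Nat) (cs : List (Nat × Nat)) (p : Nat × Nat) :
    pvFoldD map l w (cs ++ [p]) = pvDStep map l w (pvFoldD map l w cs) p := by
  simp [pvFoldD, List.foldl_append]

lemma exists_mem_append_singleton {α : Type} (P : α → Prop) (cs : List α) (p : α) :
    (∃ q ∈ cs ++ [p], P q) ↔ (∃ q ∈ cs, P q) ∨ P p := by
  simp [List.mem_append, or_and_right, exists_or]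

lemma keys_foldD (map : List (List Int)) (l w : Nat) :
    ∀ cs : List (Nat × Nat),
      (pvFoldD map l w cs).keys.Nodup ∧
      ∀ v, (v ∈ (pvFoldD map l w cs).keys ↔ ∃ p ∈ cs, pvCell map p.1 p.2 = v) := by
  intro cs
  induction cs using List.reverseRecOn with
  | nil => simp [pvFoldD]
  | append_singleton cs p ih =>
    obtain ⟨ihn, ihm⟩ := ih
    rw [foldD_append]
    unfold pvDStep
    refine ⟨?_, ?_⟩
    · rw [PySem.Dict.keys_modify]
      apply PySem.Dict.nodup_keys_insert
      by_cases hc : (pvFoldD map l w cs).contains (pvCell map p.1 p.2)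
      · rw [if_pos hc]; exact ihn
      · rw [if_neg hc]; exact PySem.Dict.nodup_keys_insert _ _ _ ihn
    · intro v
      rw [PySem.Dict.keys_modify, PySem.Dict.mem_keys_insert,
        exists_mem_append_singleton, ← ihm v]
      by_cases hc : (pvFoldD map l w cs).contains (pvCell map p.1 p.2)
      · rw [if_pos hc]
        have hkc : pvCell map p.1 p.2 ∈ (pvFoldD map l w cs).keys :=
          (PySem.Dict.contains_iff_mem_keys _ _).mp hc
        constructor
        · rintro (rfl | h)
          · exact Or.inl hkc
          · exact Or.inl h
        · rintro (h | rfl)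
          · exact Or.inr h
          · exact Or.inl rfl
      · rw [if_neg hc, PySem.Dict.mem_keys_insert]
        constructor
        · rintro (rfl | rfl | h)
          · exact Or.inr rfl
          · exact Or.inr rfl
          · exact Or.inl h
        · rintro (h | rfl)
          · exact Or.inr (Or.inr h)
          · exact Or.inl rfl

lemma mem_getD_foldD (map : List (List Int)) (l w : Nat) :
    ∀ (cs : List (Nat × Nat)) (v : Int) (x : Int × Int),
      (x ∈ (pvFoldD map l w cs).getD v PySem.Set.empty ↔
        ((∃ c, cs.find? (fun p => pvCell map p.1 p.2 == v) = some c ∧ x = ((c.1 : Int), (c.2 : Int))) ∨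
         ∃ p ∈ cs, pvCell map p.1 p.2 = v ∧ x ∈ pvNbrs map l w p)) := by
  intro cs
  induction cs using List.reverseRecOn with
  | nil =>
    intro v x
    simp [pvFoldD, PySem.Dict.getD_empty, PySem.Set.empty]
  | append_singleton cs p ih =>
    intro v x
    rw [foldD_append]
    unfold pvDStep
    have hfind : (cs ++ [p]).find? (fun q => pvCell map q.1 q.2 == v)
        = ((cs.find? (fun q => pvCell map q.1 q.2 == v)).or
            (if pvCell map p.1 p.2 == v then some p else none)) := by
      rw [List.find?_append]
      congr 1
      cases hb : (pvCell map p.1 p.2 == v) <;> simp [List.find?, hb]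
    have hsplit := exists_mem_append_singleton
      (fun q => pvCell map q.1 q.2 = v ∧ x ∈ pvNbrs map l w q) cs p
    by_cases hv : pvCell map p.1 p.2 = v
    · subst hv
      by_cases hc : (pvFoldD map l w cs).contains (pvCell map p.1 p.2)
      · have hsome : (cs.find? (fun q => pvCell map q.1 q.2 == pvCell map p.1 p.2)).isSome := by
          rw [List.find?_isSome]
          obtain ⟨q, hq, hqv⟩ := ((keys_foldD map l w cs).2 _).mp
            ((PySem.Dict.contains_iff_mem_keys _ _).mp hc)
          exact ⟨q, hq, by simp [hqv]⟩
        obtain ⟨c, hcfind⟩ := Option.isSome_iff_exists.mp hsome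
        rw [if_pos hc, PySem.Dict.getD_modify_self, PySem.Set.mem_update, ih, hfind, hcfind,
          hsplit]
        simp only [beq_self_eq_true, if_true, Option.some_or, Option.some.injEq,
          exists_eq_left']
        simp only [true_and, or_assoc]
      · have hnone : cs.find? (fun q => pvCell map q.1 q.2 == pvCell map p.1 p.2) = none := by
          rw [List.find?_eq_none]
          intro q hq
          simp only [beq_iff_eq]
          intro hqv
          exact hc ((PySem.Dict.contains_iff_mem_keys _ _).mpr
            (((keys_foldD map l w cs).2 _).mpr ⟨q, hq, hqv⟩))
        have hnoq : ¬ ∃ q ∈ cs, pvCell map q.1 q.2 = pvCell map p.1 p.2 := by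
          rintro ⟨q, hq, hqv⟩
          exact hc ((PySem.Dict.contains_iff_mem_keys _ _).mpr
            (((keys_foldD map l w cs).2 _).mpr ⟨q, hq, hqv⟩))
        have hihfalse : ∀ y : Int × Int, ¬ y ∈ (pvFoldD map l w cs).getD (pvCell map p.1 p.2) PySem.Set.empty := by
          intro y hy
          rcases (ih _ y).mp hy with ⟨c, hcf, _⟩ | ⟨q, hq, hqv, _⟩
          · rw [hnone] at hcf; cases hcf
          · exact hnoq ⟨q, hq, hqv⟩
        rw [if_neg hc, PySem.Dict.getD_modify_self, PySem.Dict.getD_insert_self,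
          PySem.Set.mem_update, hfind, hnone, hsplit]
        simp only [beq_self_eq_true, if_true, Option.none_or, Option.some.injEq,
          exists_eq_left', PySem.Set.mem_ofList, List.mem_singleton, true_and]
        constructor
        · rintro (h | h)
          · exact Or.inl h
          · exact Or.inr (Or.inr h)
        · rintro (h | h | h)
          · exact Or.inl h
          · obtain ⟨q, hq, hqv, _⟩ := h
            exact absurd ⟨q, hq, hqv⟩ hnoq
          · exact Or.inr h
    · have hgd : ((if (pvFoldD map l w cs).contains (pvCell map p.1 p.2) then pvFoldD map l w cs
          else (pvFoldD map l w cs).insert (pvCell map p.1 p.2)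
            (PySem.Set.ofList [((p.1 : Int), (p.2 : Int))])).modify (pvCell map p.1 p.2)
            PySem.Set.empty (fun s => PySem.Set.update s (pvNbrs map l w p))).getD v PySem.Set.empty
          = (pvFoldD map l w cs).getD v PySem.Set.empty := by
        rw [PySem.Dict.getD_modify, if_neg (fun h => hv h.symm)]
        by_cases hc : (pvFoldD map l w cs).contains (pvCell map p.1 p.2)
        · rw [if_pos hc]
        · rw [if_neg hc, PySem.Dict.getD_insert, if_neg (fun h => hv h.symm)]
      rw [hgd, ih, hfind, hsplit]
      simp only [beq_iff_eq, if_neg hv, Option.or_none]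
      constructor
      · rintro (h | h)
        · exact Or.inl h
        · exact Or.inr (Or.inl h)
      · rintro (h | h | ⟨he, _⟩)
        · exact Or.inl h
        · exact Or.inr h
        · exact absurd he hv

lemma nodup_getD_foldD (map : List (List Int)) (l w : Nat) :
    ∀ (cs : List (Nat × Nat)) (v : Int),
      ((pvFoldD map l w cs).getD v PySem.Set.empty).Nodup := by
  intro cs
  induction cs using List.reverseRecOn with
  | nil => intro v; simp [pvFoldD, PySem.Dict.getD_empty, PySem.Set.empty]
  | append_singleton cs p ih =>
    intro v
    rw [foldD_append]
    unfold pvDStep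
    by_cases hv : pvCell map p.1 p.2 = v
    · subst hv
      by_cases hc : (pvFoldD map l w cs).contains (pvCell map p.1 p.2)
      · rw [if_pos hc, PySem.Dict.getD_modify_self]
        exact PySem.Set.nodup_update _ _ (ih _)
      · rw [if_neg hc, PySem.Dict.getD_modify_self, PySem.Dict.getD_insert_self]
        exact PySem.Set.nodup_update _ _ (PySem.Set.nodup_ofList _)
    · rw [PySem.Dict.getD_modify, if_neg (fun h => hv h.symm)]
      by_cases hc : (pvFoldD map l w cs).contains (pvCell map p.1 p.2)
      · rw [if_pos hc]; exact ih v
      · rw [if_neg hc, PySem.Dict.getD_insert, if_neg (fun h => hv h.symm)]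
        exact ih v

-- ---- the neighbour set of a cell ----

lemma mem_pvNbrs (map : List (List Int)) {l w : Nat} {p : Nat × Nat}
    (hp1 : p.1 < l) (hp2 : p.2 < w) (x : Int × Int) :
    x ∈ pvNbrs map l w p ↔ ∃ q : Nat × Nat, q.1 < l ∧ q.2 < w ∧ pvAdj p q ∧
      pvCell map q.1 q.2 = pvCell map p.1 p.2 ∧ x = ((q.1 : Int), (q.2 : Int)) := by
  unfold pvNbrs
  rw [PySem.List.foldl_ite_eq_foldl_filter,
    show (PySem.Set.empty : PySem.Set (Int × Int)) = [] from rfl, ← PySem.Set.ofList_eq_foldl,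
    PySem.Set.mem_ofList]
  simp only [List.mem_filter, decide_eq_true_iff, List.mem_cons, List.not_mem_nil, or_false]
  constructor
  · rintro ⟨rfl | rfl | rfl | rfl, h0, hl', h0', hw', hcell⟩
    · refine ⟨(p.1 - 1, p.2), by omega, hp2, Or.inr ⟨rfl, by omega⟩, ?_, ?_⟩
      · have e1 : ((p.1 : Int) - 1).toNat = p.1 - 1 := by omega
        have e2 : ((p.2 : Int)).toNat = p.2 := by omega
        rw [← e1, ← e2]; exact hcell
      · have e : ((p.1 - 1 : Nat) : Int) = (p.1 : Int) - 1 := by omega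
        rw [e]
    · refine ⟨(p.1, p.2 + 1), hp1, by omega, Or.inl ⟨rfl, Or.inl rfl⟩, ?_, ?_⟩
      · have e1 : ((p.1 : Int)).toNat = p.1 := by omega
        have e2 : ((p.2 : Int) + 1).toNat = p.2 + 1 := by omega
        rw [← e1, ← e2]; exact hcell
      · have e : ((p.2 + 1 : Nat) : Int) = (p.2 : Int) + 1 := by omega
        rw [e]
    · refine ⟨(p.1 + 1, p.2), by omega, hp2, Or.inr ⟨rfl, Or.inl rfl⟩, ?_, ?_⟩
      · have e1 : ((p.1 : Int) + 1).toNat = p.1 + 1 := by omega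
        have e2 : ((p.2 : Int)).toNat = p.2 := by omega
        rw [← e1, ← e2]; exact hcell
      · have e : ((p.1 + 1 : Nat) : Int) = (p.1 : Int) + 1 := by omega
        rw [e]
    · refine ⟨(p.1, p.2 - 1), hp1, by omega, Or.inl ⟨rfl, Or.inr (by omega)⟩, ?_, ?_⟩
      · have e1 : ((p.1 : Int)).toNat = p.1 := by omega
        have e2 : ((p.2 : Int) - 1).toNat = p.2 - 1 := by omega
        rw [← e1, ← e2]; exact hcell
      · have e : ((p.2 - 1 : Nat) : Int) = (p.2 : Int) - 1 := by omega
        rw [e]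
  · rintro ⟨q, hq1, hq2, hadj, hcell, rfl⟩
    rcases hadj with ⟨h1, h2 | h2⟩ | ⟨h1, h2 | h2⟩
    · -- q is the right neighbour: second literal
      have e1 : ((q.1 : Int)) = (p.1 : Int) := by omega
      have e2 : ((q.2 : Int)) = (p.2 : Int) + 1 := by omega
      refine ⟨Or.inr (Or.inl (by rw [e1, e2])), by omega, by omega, by omega, by omega, ?_⟩
      show pvCell map ((q.1 : Int)).toNat ((q.2 : Int)).toNat = pvCell map p.1 p.2
      rw [show ((q.1 : Int)).toNat = q.1 by omega, show ((q.2 : Int)).toNat = q.2 by omega]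
      exact hcell
    · -- q is the left neighbour: fourth literal
      have e1 : ((q.1 : Int)) = (p.1 : Int) := by omega
      have e2 : ((q.2 : Int)) = (p.2 : Int) - 1 := by omega
      refine ⟨Or.inr (Or.inr (Or.inr (by rw [e1, e2]))), by omega, by omega, by omega, by omega, ?_⟩
      show pvCell map ((q.1 : Int)).toNat ((q.2 : Int)).toNat = pvCell map p.1 p.2
      rw [show ((q.1 : Int)).toNat = q.1 by omega, show ((q.2 : Int)).toNat = q.2 by omega]
      exact hcell
    · -- q is the down neighbour: third literal
      have e1 : ((q.1 : Int)) = (p.1 : Int) + 1 := by omega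
      have e2 : ((q.2 : Int)) = (p.2 : Int) := by omega
      refine ⟨Or.inr (Or.inr (Or.inl (by rw [e1, e2]))), by omega, by omega, by omega, by omega, ?_⟩
      show pvCell map ((q.1 : Int)).toNat ((q.2 : Int)).toNat = pvCell map p.1 p.2
      rw [show ((q.1 : Int)).toNat = q.1 by omega, show ((q.2 : Int)).toNat = q.2 by omega]
      exact hcell
    · -- q is the up neighbour: first literal
      have e1 : ((q.1 : Int)) = (p.1 : Int) - 1 := by omega
      have e2 : ((q.2 : Int)) = (p.2 : Int) := by omega
      refine ⟨Or.inl (by rw [e1, e2]), by omega, by omega, by omega, by omega, ?_⟩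
      show pvCell map ((q.1 : Int)).toNat ((q.2 : Int)).toNat = pvCell map p.1 p.2
      rw [show ((q.1 : Int)).toNat = q.1 by omega, show ((q.2 : Int)).toNat = q.2 by omega]
      exact hcell

-- ---- two distinct members make a nodup list longer than 1 ----

lemma one_lt_length_of_two {α : Type} {L : List α} {x y : α}
    (hx : x ∈ L) (hy : y ∈ L) (hxy : x ≠ y) : 1 < L.length := by
  match L with
  | [] => exact absurd hx (by simp)
  | [a] => simp_all
  | a :: b :: t => simp

lemma exists_two_of_one_lt {α : Type} {L : List α} (hnd : L.Nodup) (h : 1 < L.length) :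
    ∃ x ∈ L, ∃ y ∈ L, x ≠ y := by
  match L, hnd with
  | [], _ => simp at h
  | [a], _ => simp at h
  | a :: b :: t, hnd =>
    exact ⟨a, by simp, b, by simp,
      fun he => (List.nodup_cons.mp hnd).1 (he ▸ List.mem_cons_self)⟩

-- ---- per-value size of A's coordinate set = existence of an adjacent equal pair ----

lemma count_iff (map : List (List Int)) (l w : Nat) (v : Int) :
    ((∃ p ∈ pvGrid l w, pvCell map p.1 p.2 = v) ∧
      1 < ((pvFoldD map l w (pvGrid l w)).getD v PySem.Set.empty).length)
    ↔ ∃ p ∈ pvGrid l w, pvCell map p.1 p.2 = v ∧ pvCond4 map l w p := by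
  constructor
  · rintro ⟨-, hlen⟩
    obtain ⟨x, hx, y, hy, hxy⟩ := exists_two_of_one_lt (nodup_getD_foldD map l w _ v) hlen
    have hx' := (mem_getD_foldD map l w _ v x).mp hx
    have hy' := (mem_getD_foldD map l w _ v y).mp hy
    rcases hx' with ⟨c, hcf, rfl⟩ | ⟨p, hp, hpv, hxn⟩
    · rcases hy' with ⟨c', hcf', rfl⟩ | ⟨p, hp, hpv, hyn⟩
      · rw [hcf] at hcf'
        cases hcf'
        exact absurd rfl hxy
      · have hpb := mem_pvGrid.mp hp
        obtain ⟨q, hq1, hq2, hadj, hqv, -⟩ := (mem_pvNbrs map hpb.1 hpb.2 y).mp hyn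
        exact ⟨p, hp, hpv, q, hq1, hq2, hadj, hqv⟩
    · have hpb := mem_pvGrid.mp hp
      obtain ⟨q, hq1, hq2, hadj, hqv, -⟩ := (mem_pvNbrs map hpb.1 hpb.2 x).mp hxn
      exact ⟨p, hp, hpv, q, hq1, hq2, hadj, hqv⟩
  · rintro ⟨p, hp, hpv, q, hq1, hq2, hadj, hqv⟩
    refine ⟨⟨p, hp, hpv⟩, ?_⟩
    have hsome : ((pvGrid l w).find? (fun r => pvCell map r.1 r.2 == v)).isSome := by
      rw [List.find?_isSome]
      exact ⟨p, hp, by simp [hpv]⟩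
    obtain ⟨c, hcf⟩ := Option.isSome_iff_exists.mp hsome
    have hcv : pvCell map c.1 c.2 = v := by simpa using List.find?_some hcf
    have hcg : c ∈ pvGrid l w := List.mem_of_find?_eq_some hcf
    have hpb := mem_pvGrid.mp hp
    have hm1 : ((c.1 : Int), (c.2 : Int))
        ∈ (pvFoldD map l w (pvGrid l w)).getD v PySem.Set.empty :=
      (mem_getD_foldD map l w _ v _).mpr (Or.inl ⟨c, hcf, rfl⟩)
    have hqmem : ((q.1 : Int), (q.2 : Int)) ∈ pvNbrs map l w p :=
      (mem_pvNbrs map hpb.1 hpb.2 _).mpr ⟨q, hq1, hq2, hadj, hqv, rfl⟩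
    have hm2 : ((q.1 : Int), (q.2 : Int))
        ∈ (pvFoldD map l w (pvGrid l w)).getD v PySem.Set.empty :=
      (mem_getD_foldD map l w _ v _).mpr (Or.inr ⟨p, hp, hpv, hqmem⟩)
    by_cases hqc : q = c
    · subst hqc
      have hpq : ((p.1 : Int), (p.2 : Int)) ∈ pvNbrs map l w q :=
        (mem_pvNbrs map hq1 hq2 _).mpr ⟨p, hpb.1, hpb.2, pvAdj_symm hadj, hqv.symm, rfl⟩
      have hm3 : ((p.1 : Int), (p.2 : Int))
          ∈ (pvFoldD map l w (pvGrid l w)).getD v PySem.Set.empty :=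
        (mem_getD_foldD map l w _ v _).mpr
          (Or.inr ⟨q, mem_pvGrid.mpr ⟨hq1, hq2⟩, hqv.trans hpv, hpq⟩)
      have hne : ((p.1 : Int), (p.2 : Int)) ≠ ((q.1 : Int), (q.2 : Int)) := by
        have hne' := pvAdj_ne hadj
        intro he
        apply hne'
        simp only [Prod.ext_iff] at he ⊢
        omega
      exact one_lt_length_of_two hm3 hm1 hne
    · have hne : ((q.1 : Int), (q.2 : Int)) ≠ ((c.1 : Int), (c.2 : Int)) := by
        intro he
        apply hqc
        simp only [Prod.ext_iff] at he ⊢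
        omega
      exact one_lt_length_of_two hm2 hm1 hne

-- ===== VERDICT (by name: the statement is the Claim_ definition above) =====
theorem find_num_countries_spec : Claim_equal_find_num_countries := by
  intro map _ _
  unfold Spec_find_num_countries
  rw [a_eq, alt_eq]
  obtain ⟨hnd, hmemk⟩ := keys_foldD map map.length map.headI.length
    (pvGrid map.length map.headI.length)
  rw [PySem.List.sum_map_const_int, mul_one,
    PySem.Dict.values_eq_map_keys _ hnd PySem.Set.empty, List.filter_map, List.length_map]
  have hkey : ((pvFoldD map map.length map.headI.length
        (pvGrid map.length map.headI.length)).keys.filter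
          ((fun s => decide (1 < s.length)) ∘ fun k =>
            (pvFoldD map map.length map.headI.length
              (pvGrid map.length map.headI.length)).getD k PySem.Set.empty)).length
      = (PySem.Set.ofList (pvM map map.length map.headI.length)).length := by
    rw [← List.toFinset_card_of_nodup (hnd.filter _),
      ← List.toFinset_card_of_nodup (PySem.Set.nodup_ofList _)]
    congr 1
    apply Finset.ext
    intro v
    simp only [List.mem_toFinset, List.mem_filter, Function.comp_apply, decide_eq_true_iff]
    rw [hmemk v, PySem.Set.mem_ofList]
    rw [count_iff map map.length map.headI.length v, cond4_iff_condB]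
    exact (mem_pvM (map := map) (l := map.length) (w := map.headI.length) (v := v)).symm
  rw [hkey]
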